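-- pv_equiv track=rewrite | github.com/Willianan/Algorithm_Book | Chapter5/5.17.py | getLargestSub
-- ===== SOURCE A (Python) =====
-- def getLargestSub(src):
-- 	if src == None:
-- 		return None
-- 	largestSub = [None]*(len(src)+1)
-- 	k = 0
-- 	i = 0
-- 	while i < len(src):
-- 		largestSub[k] = list(src)[i]
-- 		j = i + 1
-- 		while j < len(src):
-- 			# 找出第i个字符后面最大的字符放到largestSub[k]中
-- 			if list(src)[j] > largestSub[k]:
-- 				largestSub[k] = list(src)[j]
-- 				i = j
-- 			j += 1
-- 		k += 1
-- 		i += 1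
-- 	return ''.join(largestSub[0:k])
-- ===== SOURCE B (Python) =====
-- def getLargestSub(src):
--     # O(n): precompute, right-to-left, the leftmost index of the maximum of each suffix,
--     # then jump through those indices collecting the characters.
--     if src is None:
--         return None
--     n = len(src)
--     fm = [0] * n
--     best = n - 1
--     for i in range(n - 1, -1, -1):
--         if src[i] >= src[best]:
--             best = i
--         fm[i] = best
--     out = []
--     i = 0
--     while i < n:
--         j = fm[i]
--         out.append(src[j])
--         i = j + 1
--     return ''.join(out)
-- ===== Notes on version B (the rewrite author's own statement) =====
-- stated objective: faster
-- what changed: A rescans the whole remaining suffix (rebuilding list(src) on every access) for each output character; B does one right-to-left pass computing the leftmost suffix-maximum index for every position and then jumps through those indices, O(n) total.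
import Mathlib
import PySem

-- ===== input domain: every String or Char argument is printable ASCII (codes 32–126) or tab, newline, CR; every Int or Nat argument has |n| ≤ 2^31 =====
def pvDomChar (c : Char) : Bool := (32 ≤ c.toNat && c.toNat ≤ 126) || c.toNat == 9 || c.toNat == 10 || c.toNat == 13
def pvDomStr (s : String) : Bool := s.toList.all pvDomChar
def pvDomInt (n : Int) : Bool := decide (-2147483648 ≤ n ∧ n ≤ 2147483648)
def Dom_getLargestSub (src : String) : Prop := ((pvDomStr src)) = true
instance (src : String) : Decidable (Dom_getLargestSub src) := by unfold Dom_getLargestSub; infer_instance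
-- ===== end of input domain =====

-- B replaces A's rescan-of-the-suffix-per-output-character with a single right-to-left
-- precomputation of each suffix's leftmost maximum index followed by index jumps (objective: faster).

-- ===== PORT A =====
-- inner while loop: scan j from i+1, tracking current record char `cur` and record index `i0`
def pvInnerA (cs : List Char) (cur : Char) (i0 j : Nat) : Char × Nat :=
  if _h : j < cs.length then
    if cur < cs[j]! then pvInnerA cs (cs[j]!) j (j + 1)
    else pvInnerA cs cur i0 (j + 1)
  else (cur, i0)
termination_by cs.length - j

-- outer while loop; i strictly increases each iteration, so fuel = cs.length suffices
def pvOuterA (cs : List Char) : Nat → Nat → List Char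
  | 0, _ => []
  | fuel + 1, i =>
    if i < cs.length then
      let r := pvInnerA cs cs[i]! i (i + 1)
      r.1 :: pvOuterA cs fuel (r.2 + 1)
    else []

def getLargestSub (src : String) : String :=
  String.mk (pvOuterA src.toList src.toList.length 0)

-- ===== PORT B =====
-- right-to-left pass: fm[i] = leftmost index of the maximum of cs[i:]
def pvFmGo (cs : List Char) : Nat → Nat → List Nat → List Nat
  | 0, _, acc => acc
  | i + 1, best, acc =>
    let best' := if cs[best]! ≤ cs[i]! then i else best
    pvFmGo cs i best' (best' :: acc)

-- jump loop: emit cs[fm[i]] and continue at fm[i]+1; fuel = cs.length suffices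
def pvJumpB (cs : List Char) (fm : List Nat) : Nat → Nat → List Char
  | _, 0 => []
  | i, fuel + 1 =>
    if i < cs.length then
      let j := fm[i]!
      cs[j]! :: pvJumpB cs fm (j + 1) fuel
    else []

def getLargestSub_alt (src : String) : String :=
  let cs := src.toList
  let n := cs.length
  let fm := pvFmGo cs n (n - 1) []
  String.mk (pvJumpB cs fm 0 n)

-- ===== PRECONDITION & SPEC =====
def Spec_getLargestSub (src : String) (out : String) : Prop := out = getLargestSub_alt src
instance (src : String) (out : String) : Decidable (Spec_getLargestSub src out) := by unfold Spec_getLargestSub; infer_instance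

-- ===== CLAIM (what is proved, stated in full; the proofs are below) =====
def Claim_equal_getLargestSub : Prop := ∀ (src : String), Dom_getLargestSub src → Spec_getLargestSub src (getLargestSub src)

-- ===== LEMMAS AND PROOFS =====

-- pvF cs k = leftmost index of the maximum of the last k characters (pvF 0 = length-1 seed)
def pvF (cs : List Char) : Nat → Nat
  | 0 => cs.length - 1
  | k + 1 => if cs[pvF cs k]! ≤ cs[cs.length - 1 - k]! then cs.length - 1 - k else pvF cs k

theorem pvF_ge (cs : List Char) (k : Nat) : cs.length - (k + 1) ≤ pvF cs (k + 1) := by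
  induction k with
  | zero => simp [pvF]
  | succ k ih =>
    show cs.length - (k + 2) ≤ pvF cs (k + 2)
    rw [pvF]
    split <;> omega

theorem pvFmGo_spec (cs : List Char) (i : Nat) (acc : List Nat) (h : i ≤ cs.length) :
    pvFmGo cs i (pvF cs (cs.length - i)) acc
      = (List.range i).map (fun t => pvF cs (cs.length - t)) ++ acc := by
  induction i generalizing acc with
  | zero => simp [pvFmGo]
  | succ i ih =>
    rw [pvFmGo]
    have hk : cs.length - i = (cs.length - (i + 1)) + 1 := by omega
    have hidx : cs.length - 1 - (cs.length - (i + 1)) = i := by omega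
    have hbest : (if cs[pvF cs (cs.length - (i + 1))]! ≤ cs[i]! then i
                  else pvF cs (cs.length - (i + 1))) = pvF cs (cs.length - i) := by
      rw [hk, pvF, hidx]
    simp only [hbest]
    rw [ih _ (by omega)]
    rw [List.range_succ, List.map_append]
    simp

theorem pvFm_get (cs : List Char) (i : Nat) (h : i < cs.length) :
    (pvFmGo cs cs.length (cs.length - 1) [])[i]! = pvF cs (cs.length - i) := by
  have h0 : pvF cs (cs.length - cs.length) = cs.length - 1 := by
    simp [pvF]
  have := pvFmGo_spec cs cs.length [] (le_refl _)
  rw [h0] at this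
  rw [this]
  have hlen : ((List.range cs.length).map (fun t => pvF cs (cs.length - t)) ++ ([] : List Nat)).length = cs.length := by simp
  rw [List.getElem!_eq_getElem?_getD, List.getElem?_eq_getElem (by simpa using h)]
  simp

theorem pvInnerA_spec (cs : List Char) (k : Nat) (hk : k ≤ cs.length) :
    ∀ cur i0, pvInnerA cs cur i0 (cs.length - k)
      = if cs.length - k < cs.length ∧ cur < cs[pvF cs k]!
        then (cs[pvF cs k]!, pvF cs k) else (cur, i0) := by
  induction k with
  | zero =>
    intro cur i0
    rw [pvInnerA]
    simp
  | succ k ih =>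
    intro cur i0
    have hj : cs.length - (k + 1) < cs.length := by omega
    have hj1 : cs.length - (k + 1) + 1 = cs.length - k := by omega
    have hidx : cs.length - 1 - k = cs.length - (k + 1) := by omega
    rw [pvInnerA, dif_pos hj, hj1]
    set j := cs.length - (k + 1) with hjdef
    have hF : pvF cs (k + 1) = if cs[pvF cs k]! ≤ cs[j]! then j else pvF cs k := by
      rw [pvF, hidx]
    by_cases hcur : cur < cs[j]!
    · rw [if_pos hcur, ih (by omega)]
      by_cases hc : cs.length - k < cs.length ∧ cs[j]! < cs[pvF cs k]!
      · have hFk : pvF cs (k + 1) = pvF cs k := by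
          rw [hF, if_neg (by exact not_le.mpr hc.2)]
        rw [if_pos hc, if_pos ⟨hj, by rw [hFk]; exact lt_trans hcur hc.2⟩, hFk]
      · have hle : cs[pvF cs k]! ≤ cs[j]! := by
          by_cases hk0 : cs.length - k < cs.length
          · exact not_lt.mp (fun h => hc ⟨hk0, h⟩)
          · have : k = 0 := by omega
            subst this
            have : pvF cs 0 = j := by simp [pvF]; omega
            rw [this]
        have hFj : pvF cs (k + 1) = j := by rw [hF, if_pos hle]
        rw [if_neg hc, if_pos ⟨hj, by rw [hFj]; exact hcur⟩, hFj]
    · rw [if_neg hcur, ih (by omega)]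
      by_cases hc : cs.length - k < cs.length ∧ cur < cs[pvF cs k]!
      · have hlt : ¬ cs[pvF cs k]! ≤ cs[j]! := by
          intro hle
          exact hcur (lt_of_lt_of_le hc.2 hle)
        have hFk : pvF cs (k + 1) = pvF cs k := by rw [hF, if_neg hlt]
        rw [if_pos hc, if_pos ⟨hj, by rw [hFk]; exact hc.2⟩, hFk]
      · rw [if_neg hc, if_neg ?_]
        rw [hF]
        rintro ⟨-, habs⟩
        by_cases hk0 : cs.length - k < cs.length
        · split at habs
          · exact hcur habs
          · exact hc ⟨hk0, habs⟩
        · have : k = 0 := by omega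
          subst this
          have h0 : pvF cs 0 = j := by simp [pvF]; omega
          rw [h0, ite_self] at habs
          exact hcur habs

theorem pvOuterA_eq_pvJumpB (cs : List Char) :
    ∀ fuelA fuelB i, cs.length - i ≤ fuelA → cs.length - i ≤ fuelB →
      pvOuterA cs fuelA i = pvJumpB cs (pvFmGo cs cs.length (cs.length - 1) []) i fuelB := by
  intro fuelA
  induction fuelA with
  | zero =>
    intro fuelB i hA hB
    have : ¬ i < cs.length := by omega
    cases fuelB <;> simp [pvOuterA, pvJumpB, this]
  | succ fuelA ih =>
    intro fuelB i hA hB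
    by_cases hi : i < cs.length
    · obtain ⟨fb, rfl⟩ : ∃ fb, fuelB = fb + 1 := ⟨fuelB - 1, by omega⟩
      have hk : cs.length - (cs.length - (i + 1)) = i + 1 := by omega
      have hinner := pvInnerA_spec cs (cs.length - (i + 1)) (by omega) cs[i]! i
      rw [hk] at hinner
      set k := cs.length - (i + 1) with hkdef
      have hidx : cs.length - 1 - k = i := by omega
      have hF : pvF cs (k + 1) = if cs[pvF cs k]! ≤ cs[i]! then i else pvF cs k := by
        rw [pvF, hidx]
      have hki : cs.length - i = k + 1 := by omega
      have hr : pvInnerA cs cs[i]! i (i + 1) = (cs[pvF cs (k + 1)]!, pvF cs (k + 1)) := by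
        rw [hinner]
        by_cases hc : i + 1 < cs.length ∧ cs[i]! < cs[pvF cs k]!
        · have : pvF cs (k + 1) = pvF cs k := by
            rw [hF, if_neg (not_le.mpr hc.2)]
          rw [if_pos hc, this]
        · have hFi : pvF cs (k + 1) = i := by
            by_cases hk0 : i + 1 < cs.length
            · rw [hF, if_pos (not_lt.mp (fun h => hc ⟨hk0, h⟩))]
            · have hk00 : k = 0 := by omega
              have h0 : pvF cs 0 = i := by simp [pvF]; omega
              rw [hF, hk00, h0, ite_self]
          rw [if_neg hc, hFi]
      have hge : i ≤ pvF cs (k + 1) := by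
        have := pvF_ge cs k
        omega
      rw [pvOuterA, if_pos hi, hr, pvJumpB, if_pos hi, pvFm_get cs i hi, hki]
      simp only [List.cons.injEq, true_and]
      exact ih fb (pvF cs (k + 1) + 1) (by omega) (by omega)
    · obtain _ | fb := fuelB <;> simp [pvOuterA, pvJumpB, hi]

-- ===== VERDICT (by name: the statement is the Claim_ definition above) =====
theorem getLargestSub_spec : Claim_equal_getLargestSub := by
  intro src _
  unfold Spec_getLargestSub getLargestSub getLargestSub_alt
  simp only []
  rw [pvOuterA_eq_pvJumpB src.toList src.toList.length src.toList.length 0 (by omega) (by omega)]
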